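-- pv_equiv track=rewrite | github.com/kr37577/vuljit | scripts/modeling/main_per_project.py | _resolve_training_projects
-- ===== SOURCE A (Python) =====
-- from typing import List, Dict, Any, Optional
--
-- def _resolve_training_projects(
--     scope: str,
--     explicit_projects: List[str],
--     available_projects: Dict[str, str],
--     target_project: str,
-- ) -> List[str]:
--     scope = (scope or 'list').lower()
--     explicit_set = {p for p in explicit_projects if p}
--
--     if scope == 'all':
--         candidates = sorted(available_projects.keys())
--     elif scope == 'exclude_target':
--         candidates = sorted(p for p in available_projects.keys() if p != target_project)
--     else:
--         candidates = sorted(explicit_set)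
--
--     if scope != 'list' and explicit_set:
--         candidates = [p for p in candidates if p in explicit_set]
--
--     deduped: List[str] = []
--     seen = set()
--     for project in candidates:
--         if project == target_project or project in seen:
--             continue
--         if project not in available_projects:
--             continue
--         deduped.append(project)
--         seen.add(project)
--
--     return deduped
-- ===== SOURCE B (Python) =====
-- def _resolve_training_projects(
--     scope,
--     explicit_projects,
--     available_projects,
--     target_project,
-- ):
--     scope = (scope or 'list').lower()
--     explicit = {p for p in explicit_projects if p}
--     wide = (not explicit) and scope in ('all', 'exclude_target')
--     result = []
--     for key in available_projects:
--         if key == target_project: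
--             continue
--         if not wide and key not in explicit:
--             continue
--         lo, hi = 0, len(result)
--         while lo < hi:
--             mid = (lo + hi) // 2
--             if result[mid] < key:
--                 lo = mid + 1
--             else:
--                 hi = mid
--         if lo < len(result) and result[lo] == key:
--             continue
--         result.insert(lo, key)
--     return result
-- ===== Notes on version B (the rewrite author's own statement) =====
-- stated objective: alternative
-- what changed: Replaces A's sort-candidates-then-dedup-loop pipeline by a single streaming pass over the registry keys that maintains the output as a sorted duplicate-free list via binary-search insertion, with no intermediate candidate list, no sort call and no seen set.
import Mathlib
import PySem

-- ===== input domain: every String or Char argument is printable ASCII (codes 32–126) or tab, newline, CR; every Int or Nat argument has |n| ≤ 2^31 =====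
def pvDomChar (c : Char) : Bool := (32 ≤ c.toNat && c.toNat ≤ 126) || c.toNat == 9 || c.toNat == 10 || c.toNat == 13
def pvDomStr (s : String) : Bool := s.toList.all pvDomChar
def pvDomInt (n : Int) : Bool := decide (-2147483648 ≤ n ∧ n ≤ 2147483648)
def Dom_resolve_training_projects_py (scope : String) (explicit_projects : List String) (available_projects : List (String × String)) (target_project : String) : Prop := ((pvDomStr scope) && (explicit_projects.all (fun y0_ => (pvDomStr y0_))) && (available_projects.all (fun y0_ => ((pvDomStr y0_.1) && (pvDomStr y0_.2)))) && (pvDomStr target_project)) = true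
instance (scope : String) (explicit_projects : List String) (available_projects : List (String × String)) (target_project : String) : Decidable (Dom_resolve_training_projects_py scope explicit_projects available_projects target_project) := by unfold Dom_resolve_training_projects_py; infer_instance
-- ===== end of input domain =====

-- B replaces A's sort-candidates-then-dedup-loop pipeline by one streaming pass over the
-- registry keys that keeps the output sorted and duplicate-free via ordered insertion
-- (objective: alternative).

-- ===== PORT A =====
-- scope = (scope or 'list').lower()
def pvNormScope (s : String) : String := PySem.Str.lower (if s = "" then "list" else s)

-- the loop body of A's dedup loop, as a named step function
def pvStepA (target : String) (keys : List String) (acc : List String × PySem.Set String) (project : String) : List String × PySem.Set String :=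
  if project = target ∨ PySem.Set.contains acc.2 project then acc
  else if project ∉ keys then acc
  else (acc.1 ++ [project], PySem.Set.add acc.2 project)

def resolve_training_projects_py (scope : String) (explicit_projects : List String) (available_projects : List (String × String)) (target_project : String) : List String :=
  let s := pvNormScope scope
  let explicit_set : PySem.Set String := PySem.Set.ofList (explicit_projects.filter (fun p => p ≠ ""))
  -- dict keys in insertion order (first occurrences)
  let keys : List String := PySem.List.dedup (available_projects.map (fun kv => kv.1))
  let candidates : List String :=
    if s = "all" then PySem.List.sorted keys (fun x => x)
    else if s = "exclude_target" then PySem.List.sorted (keys.filter (fun p => p ≠ target_project)) (fun x => x)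
    else PySem.List.sorted explicit_set (fun x => x)
  let candidates2 : List String :=
    if s ≠ "list" ∧ explicit_set ≠ [] then candidates.filter (fun p => PySem.Set.contains explicit_set p)
    else candidates
  (candidates2.foldl (pvStepA target_project keys) ([], PySem.Set.empty)).1

-- ===== PORT B =====
-- the lo/hi while loop of Source B: binary search for the leftmost insertion point
def pvBisect (res : List String) (key : String) (lo hi : Nat) : Nat :=
  if _h : lo < hi then
    let mid := (lo + hi) / 2
    if res.getD mid "" < key then pvBisect res key (mid + 1) hi
    else pvBisect res key lo mid
  else lo
termination_by hi - lo
decreasing_by all_goals omega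

-- Source B's duplicate check at the insertion point, then list.insert
def pvBinInsert (key : String) (res : List String) : List String :=
  let lo := pvBisect res key 0 res.length
  if lo < res.length ∧ res.getD lo "" = key then res
  else res.insertIdx lo key

-- the body of Source B's single pass over the registry keys
def pvStepB (target : String) (wide : Bool) (explicit : PySem.Set String) (res : List String) (kv : String × String) : List String :=
  if kv.1 = target then res
  else if wide = false ∧ PySem.Set.contains explicit kv.1 = false then res
  else pvBinInsert kv.1 res

def resolve_training_projects_py_alt (scope : String) (explicit_projects : List String) (available_projects : List (String × String)) (target_project : String) : List String :=
  let s := pvNormScope scope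
  let explicit : PySem.Set String := PySem.Set.ofList (explicit_projects.filter (fun p => p ≠ ""))
  let wide : Bool := decide (explicit = [] ∧ (s = "all" ∨ s = "exclude_target"))
  available_projects.foldl (pvStepB target_project wide explicit) []

-- ===== PRECONDITION & SPEC =====
def Spec_resolve_training_projects_py (scope : String) (explicit_projects : List String) (available_projects : List (String × String)) (target_project : String) (out : List String) : Prop := out = resolve_training_projects_py_alt scope explicit_projects available_projects target_project
instance (scope : String) (explicit_projects : List String) (available_projects : List (String × String)) (target_project : String) (out : List String) : Decidable (Spec_resolve_training_projects_py scope explicit_projects available_projects target_project out) := by unfold Spec_resolve_training_projects_py; infer_instance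

-- ===== CLAIM (what is proved, stated in full; the proofs are below) =====
def Claim_equal_resolve_training_projects_py : Prop := ∀ (scope : String) (explicit_projects : List String) (available_projects : List (String × String)) (target_project : String), Dom_resolve_training_projects_py scope explicit_projects available_projects target_project → Spec_resolve_training_projects_py scope explicit_projects available_projects target_project (resolve_training_projects_py scope explicit_projects available_projects target_project)

-- ===== LEMMAS AND PROOFS =====

-- A's dedup loop over a duplicate-free candidate list is a filter
theorem pv_loopA (target : String) (keys : List String) :
    ∀ (cs : List String) (d seen : List String), cs.Nodup → (∀ x ∈ cs, x ∉ seen) →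
      (cs.foldl (pvStepA target keys) (d, seen)).1
        = d ++ cs.filter (fun p => decide (p ≠ target) && decide (p ∈ keys)) := by
  intro cs
  induction cs with
  | nil => intro d seen _ _; simp
  | cons c cs ih =>
    intro d seen hnd hseen
    have hc : c ∉ seen := hseen c (by simp)
    have hcontains : PySem.Set.contains seen c = false := by
      simpa using fun h => hc ((PySem.Set.contains_iff seen c).1 h)
    simp only [List.foldl_cons, List.filter_cons]
    by_cases hct : c = target
    · have : pvStepA target keys (d, seen) c = (d, seen) := by
        simp [pvStepA, hct]
      rw [this, ih d seen hnd.of_cons (fun x hx => hseen x (by simp [hx]))]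
      simp [hct]
    · by_cases hk : c ∈ keys
      · have : pvStepA target keys (d, seen) c = (d ++ [c], seen ++ [c]) := by
          simp [pvStepA, hct, hk, PySem.Set.add, hc]
        rw [this, ih (d ++ [c]) (seen ++ [c]) hnd.of_cons]
        · simp [hct, hk]
        · intro x hx
          simp only [List.mem_append, List.mem_singleton]
          rintro (h | rfl)
          · exact hseen x (by simp [hx]) h
          · exact (List.nodup_cons.1 hnd).1 hx
      · have : pvStepA target keys (d, seen) c = (d, seen) := by
          simp [pvStepA, hct, hk]
        rw [this, ih d seen hnd.of_cons (fun x hx => hseen x (by simp [hx]))]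
        simp [hk]

-- sorted (identity key) of a duplicate-free list is strictly increasing
theorem pv_sorted_lt (xs : List String) (h : xs.Nodup) :
    (PySem.List.sorted xs (fun x => x)).Pairwise (· < ·) := by
  have hle := PySem.List.sorted_pairwise xs (fun x => x)
  have hnd : (PySem.List.sorted xs (fun x => x)).Nodup :=
    ((PySem.List.sorted_perm xs (fun x => x) false).nodup_iff).2 h
  exact (hle.and hnd).imp (fun h => lt_of_le_of_ne h.1 h.2)

-- A's candidate list, as a named expression (proof helper)
def pvCandA (s target : String) (E K : List String) : List String :=
  if s = "all" then PySem.List.sorted K (fun x => x)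
  else if s = "exclude_target" then PySem.List.sorted (K.filter (fun p => p ≠ target)) (fun x => x)
  else PySem.List.sorted E (fun x => x)

-- reference form of the ordered insertion (proof helper: what pvBinInsert computes on a
-- strictly sorted list)
def pvInsertSorted (key : String) : List String → List String
  | [] => [key]
  | x :: xs =>
    if x < key then x :: pvInsertSorted key xs
    else if x = key then x :: xs
    else key :: x :: xs

-- membership in an ordered insertion
theorem pv_mem_insertSorted (key a : String) (l : List String) :
    a ∈ pvInsertSorted key l ↔ a = key ∨ a ∈ l := by
  induction l with
  | nil => simp [pvInsertSorted]
  | cons x xs ih =>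
    simp only [pvInsertSorted]
    split_ifs with h1 h2
    · simp only [List.mem_cons, ih]; try tauto
    · subst h2; simp only [List.mem_cons]; try tauto
    · simp only [List.mem_cons]; try tauto

-- ordered insertion preserves strict sortedness
theorem pv_insertSorted_pairwise (key : String) :
    ∀ (l : List String), l.Pairwise (· < ·) → (pvInsertSorted key l).Pairwise (· < ·) := by
  intro l
  induction l with
  | nil => intro _; simp [pvInsertSorted]
  | cons x xs ih =>
    intro h
    have hx := (List.pairwise_cons.1 h).1
    have hxs := (List.pairwise_cons.1 h).2
    simp only [pvInsertSorted]
    split_ifs with h1 h2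
    · refine List.pairwise_cons.2 ⟨?_, ih hxs⟩
      intro b hb
      rcases (pv_mem_insertSorted key b xs).1 hb with rfl | hb
      · exact h1
      · exact hx b hb
    · exact h
    · refine List.pairwise_cons.2 ⟨?_, h⟩
      intro b hb
      have hkx : key < x := lt_of_le_of_ne (le_of_not_gt h1) (fun e => h2 e.symm)
      rcases List.mem_cons.1 hb with rfl | hb
      · exact hkx
      · exact lt_trans hkx (hx b hb)

-- binary search invariant: on a strictly sorted list, pvBisect returns a position with
-- everything below it < key and nothing from it on < key
theorem pv_bisect_spec (res : List String) (key : String) (hs : res.Pairwise (· < ·)) :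
    ∀ (n lo hi : Nat), hi - lo ≤ n → lo ≤ hi → hi ≤ res.length →
      (∀ i, i < lo → res.getD i "" < key) →
      (∀ i, hi ≤ i → i < res.length → ¬ res.getD i "" < key) →
      pvBisect res key lo hi ≤ res.length ∧
      (∀ i, i < pvBisect res key lo hi → res.getD i "" < key) ∧
      (∀ i, pvBisect res key lo hi ≤ i → i < res.length → ¬ res.getD i "" < key) := by
  have hget : ∀ i j, i < j → j < res.length → res.getD i "" < res.getD j "" := by
    intro i j hij hj
    have hi : i < res.length := lt_trans hij hj
    rw [res.getD_eq_getElem "" hi, res.getD_eq_getElem "" hj]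
    exact List.pairwise_iff_getElem.1 hs i j hi hj hij
  intro n
  induction n with
  | zero =>
    intro lo hi hn hlh hhl hbelow habove
    have : lo = hi := by omega
    subst this
    rw [pvBisect]
    simp only [lt_irrefl, dite_false]
    exact ⟨le_trans hlh hhl, hbelow, habove⟩
  | succ n ih =>
    intro lo hi hn hlh hhl hbelow habove
    rw [pvBisect]
    by_cases h : lo < hi
    · simp only [h, dite_true]
      by_cases hm : res.getD ((lo + hi) / 2) "" < key
      · simp only [hm, if_true]
        refine ih ((lo + hi) / 2 + 1) hi (by omega) (by omega) hhl ?_ habove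
        intro i hi'
        by_cases hil : i < lo
        · exact hbelow i hil
        · by_cases hieq : i = (lo + hi) / 2
          · exact hieq ▸ hm
          · exact lt_trans (hget i ((lo + hi) / 2) (by omega) (by omega)) hm
      · simp only [hm, if_false]
        refine ih lo ((lo + hi) / 2) (by omega) (by omega) (by omega) hbelow ?_
        intro i hi' hil hlt
        by_cases hieq : i = (lo + hi) / 2
        · exact hm (hieq ▸ hlt)
        · exact hm (lt_trans (hget ((lo + hi) / 2) i (by omega) hil) hlt)
    · simp only [h, dite_false]
      have : lo = hi := by omega
      exact ⟨le_trans hlh hhl, hbelow, this ▸ habove⟩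

-- any position with the bisect invariant determines the ordered insertion
theorem pv_insertSorted_char (key : String) :
    ∀ (res : List String) (j : Nat), j ≤ res.length →
      (∀ i, i < j → res.getD i "" < key) →
      (∀ i, j ≤ i → i < res.length → ¬ res.getD i "" < key) →
      pvInsertSorted key res = if j < res.length ∧ res.getD j "" = key then res else res.insertIdx j key := by
  intro res
  induction res with
  | nil =>
    intro j hj _ _
    have : j = 0 := by simpa using hj
    subst this
    simp [pvInsertSorted]
  | cons x xs ih =>
    intro j hj hbelow habove
    cases j with
    | zero =>
      have h0 : ¬ x < key := by
        have := habove 0 (Nat.zero_le _) (by simp)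
        simpa using this
      simp only [pvInsertSorted, if_neg h0]
      by_cases hxk : x = key
      · simp [hxk]
      · simp [hxk, List.insertIdx]
    | succ n =>
      have hx : x < key := by
        have := hbelow 0 (Nat.succ_pos n)
        simpa using this
      have hlen : n ≤ xs.length := by simpa using hj
      have hb : ∀ i, i < n → xs.getD i "" < key := by
        intro i hi
        have := hbelow (i + 1) (by omega)
        simpa using this
      have ha : ∀ i, n ≤ i → i < xs.length → ¬ xs.getD i "" < key := by
        intro i hni hil
        have := habove (i + 1) (by omega) (by simpa using Nat.succ_lt_succ hil)
        simpa using this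
      simp only [pvInsertSorted, if_pos hx]
      rw [ih n hlen hb ha]
      simp only [List.length_cons, List.getD_cons_succ, Nat.succ_lt_succ_iff, List.insertIdx_succ_cons]
      split_ifs <;> rfl

-- on a strictly sorted list, Source B's binary insertion is the ordered insertion
theorem pv_binInsert_eq (key : String) (res : List String) (hs : res.Pairwise (· < ·)) :
    pvBinInsert key res = pvInsertSorted key res := by
  obtain ⟨hle, hbelow, habove⟩ :=
    pv_bisect_spec res key hs res.length 0 res.length (by omega) (Nat.zero_le _) le_rfl
      (by intro i hi; omega) (by intro i hi hil; omega)
  unfold pvBinInsert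
  rw [pv_insertSorted_char key res (pvBisect res key 0 res.length) hle hbelow ?_]
  intro i hji hil
  exact habove i hji hil

-- one step of Source B's pass: membership characterization
theorem pv_stepB_mem (target : String) (wide : Bool) (E : PySem.Set String)
    (res : List String) (kv : String × String) (hs : res.Pairwise (· < ·)) (a : String) :
    a ∈ pvStepB target wide E res kv ↔
      a ∈ res ∨ (a = kv.1 ∧ a ≠ target ∧ (wide = true ∨ a ∈ E)) := by
  unfold pvStepB
  split_ifs with ht hp
  · constructor
    · exact Or.inl
    · rintro (h | ⟨rfl, hne, _⟩)
      · exact h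
      · exact (hne ht).elim
  · constructor
    · exact Or.inl
    · rintro (h | ⟨ha, _, hw | hw⟩)
      · exact h
      · rw [hp.1] at hw; exact absurd hw (by simp)
      · have hc := (PySem.Set.contains_iff E kv.1).2 (ha ▸ hw)
        rw [hp.2] at hc; exact absurd hc (by simp)
  · rw [pv_binInsert_eq kv.1 res hs, pv_mem_insertSorted]
    have hok : kv.1 ≠ target ∧ (wide = true ∨ kv.1 ∈ E) := by
      refine ⟨ht, ?_⟩
      by_cases hw : wide = true
      · exact Or.inl hw
      · by_cases hc : PySem.Set.contains E kv.1 = true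
        · exact Or.inr ((PySem.Set.contains_iff E kv.1).1 hc)
        · exact (hp ⟨by simpa using hw, by simpa using hc⟩).elim
    constructor
    · rintro (rfl | h)
      · exact Or.inr ⟨rfl, hok⟩
      · exact Or.inl h
    · rintro (h | ⟨rfl, _⟩)
      · exact Or.inr h
      · exact Or.inl rfl

-- one step of Source B's pass preserves strict sortedness
theorem pv_stepB_pairwise (target : String) (wide : Bool) (E : PySem.Set String)
    (res : List String) (kv : String × String) (h : res.Pairwise (· < ·)) :
    (pvStepB target wide E res kv).Pairwise (· < ·) := by
  unfold pvStepB
  split_ifs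
  · exact h
  · exact h
  · exact pv_binInsert_eq kv.1 res h ▸ pv_insertSorted_pairwise kv.1 res h

-- Source B's single pass: the accumulated list stays strictly sorted and collects exactly
-- the registry keys passing the predicate
theorem pv_loopB (target : String) (wide : Bool) (E : PySem.Set String) :
    ∀ (L : List (String × String)) (res : List String), res.Pairwise (· < ·) →
      (L.foldl (pvStepB target wide E) res).Pairwise (· < ·) ∧
      (∀ a, a ∈ L.foldl (pvStepB target wide E) res ↔
        a ∈ res ∨ (a ∈ L.map Prod.fst ∧ a ≠ target ∧ (wide = true ∨ a ∈ E))) := by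
  intro L
  induction L with
  | nil => intro res h; refine ⟨h, fun a => ?_⟩; simp
  | cons kv L ih =>
    intro res h
    have h' := pv_stepB_pairwise target wide E res kv h
    obtain ⟨hpw, hmem⟩ := ih (pvStepB target wide E res kv) h'
    constructor
    · simpa only [List.foldl_cons] using hpw
    · intro a
      simp only [List.foldl_cons, List.map_cons, List.mem_cons]
      rw [hmem a, pv_stepB_mem _ _ _ _ _ h]
      tauto

-- the core equality: A's pipeline and B's streaming pass produce the same list
theorem pv_core (s target : String) (E : List String) (ap : List (String × String))
    (hEnd : (E : List String).Nodup) :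
    ((if s ≠ "list" ∧ E ≠ [] then
        (pvCandA s target E (PySem.List.dedup (ap.map (fun kv => kv.1)))).filter (fun p => PySem.Set.contains E p)
      else pvCandA s target E (PySem.List.dedup (ap.map (fun kv => kv.1)))).foldl
        (pvStepA target (PySem.List.dedup (ap.map (fun kv => kv.1)))) ([], PySem.Set.empty)).1
      = ap.foldl (pvStepB target (decide (E = [] ∧ (s = "all" ∨ s = "exclude_target"))) E) [] := by
  set K : List String := PySem.List.dedup (ap.map (fun kv => kv.1)) with hK
  have hKnd : K.Nodup := by rw [hK]; simp [PySem.List.dedup_eq_ofList]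
  have hcandlt : (pvCandA s target E K).Pairwise (· < ·) := by
    unfold pvCandA
    split_ifs with h1 h2
    · exact pv_sorted_lt K hKnd
    · exact pv_sorted_lt _ (hKnd.filter _)
    · exact pv_sorted_lt E hEnd
  set cand2 : List String :=
    (if s ≠ "list" ∧ E ≠ [] then (pvCandA s target E K).filter (fun p => PySem.Set.contains E p)
     else pvCandA s target E K) with hcand2
  have hcand2lt : cand2.Pairwise (· < ·) := by
    rw [hcand2]; split_ifs with h
    · exact hcandlt.filter _
    · exact hcandlt
  have hcand2nd : cand2.Nodup := hcand2lt.imp ne_of_lt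
  rw [pv_loopA target K cand2 [] PySem.Set.empty hcand2nd (by simp [PySem.Set.empty]), List.nil_append]
  obtain ⟨hBpw, hBmem⟩ := pv_loopB target (decide (E = [] ∧ (s = "all" ∨ s = "exclude_target"))) E ap [] (by simp)
  have hBnd : (ap.foldl (pvStepB target (decide (E = [] ∧ (s = "all" ∨ s = "exclude_target"))) E) []).Nodup :=
    hBpw.imp ne_of_lt
  have hperm : (cand2.filter (fun p => decide (p ≠ target) && decide (p ∈ K))).Perm
      (ap.foldl (pvStepB target (decide (E = [] ∧ (s = "all" ∨ s = "exclude_target"))) E) []) := by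
    apply (List.perm_ext_iff_of_nodup (hcand2nd.filter _) hBnd).2
    intro a
    have hmem_cand2 : a ∈ cand2 ↔ a ∈ pvCandA s target E K ∧ ((s ≠ "list" ∧ E ≠ []) → a ∈ E) := by
      rw [hcand2]; split_ifs with h
      · simp [List.mem_filter, h]
      · simp [h]
    have hmem_cand : a ∈ pvCandA s target E K ↔
        (if s = "all" then a ∈ K
         else if s = "exclude_target" then a ∈ K ∧ a ≠ target
         else a ∈ E) := by
      unfold pvCandA
      split_ifs with h1 h2 <;> simp [PySem.List.mem_sorted, List.mem_filter]
    have hKK : a ∈ K ↔ a ∈ ap.map Prod.fst := by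
      rw [hK]; exact PySem.List.mem_dedup _ _
    rw [hBmem a]
    simp only [List.mem_filter, hmem_cand2, hmem_cand, Bool.and_eq_true, decide_eq_true_eq,
      List.not_mem_nil, false_or, hKK]
    by_cases h1 : s = "all" <;> by_cases h2 : s = "exclude_target" <;>
      by_cases h3 : s = "list" <;> by_cases h4 : E = ([] : List String) <;>
        simp_all <;> tauto
  exact List.Perm.eq_of_pairwise (fun a b _ _ hab hba => ((lt_asymm hab) hba).elim)
    (hcand2lt.filter _) hBpw hperm

theorem resolve_training_projects_py_eq (scope : String) (explicit_projects : List String)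
    (available_projects : List (String × String)) (target_project : String) :
    resolve_training_projects_py scope explicit_projects available_projects target_project
      = resolve_training_projects_py_alt scope explicit_projects available_projects target_project :=
  pv_core (pvNormScope scope) target_project
    (PySem.Set.ofList (explicit_projects.filter (fun p => p ≠ ""))) available_projects
    (PySem.Set.nodup_ofList _)

-- ===== VERDICT (by name: the statement is the Claim_ definition above) =====
theorem resolve_training_projects_py_spec : Claim_equal_resolve_training_projects_py := by
  intro scope ep ap tp _
  exact resolve_training_projects_py_eq scope ep ap tp
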